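-- pv_equiv track=rewrite | github.com/MrBrantCode/unitest_baseline | mut_generate/mist_train_cf/cf_46516/solution.py | count_ab
-- ===== SOURCE A (Python) =====
-- def count_ab(s):
--     count = 0
--     previous = None
--     for char in s:
--         if char == 'b' and previous == 'a':
--             count += 1
--         previous = char
--     return count
-- ===== SOURCE B (Python) =====
-- def count_ab(s):
--     # 'ab' cannot overlap itself, so non-overlapping substring count
--     # equals the number of adjacent a->b transitions.
--     return s.count('ab')
-- ===== Notes on version B (the rewrite author's own statement) =====
-- stated objective: idiomatic
-- what changed: Replaces the explicit previous-character state-machine scan with the built-in non-overlapping substring count s.count('ab'), which coincides because 'ab' cannot overlap itself.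
import Mathlib
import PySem

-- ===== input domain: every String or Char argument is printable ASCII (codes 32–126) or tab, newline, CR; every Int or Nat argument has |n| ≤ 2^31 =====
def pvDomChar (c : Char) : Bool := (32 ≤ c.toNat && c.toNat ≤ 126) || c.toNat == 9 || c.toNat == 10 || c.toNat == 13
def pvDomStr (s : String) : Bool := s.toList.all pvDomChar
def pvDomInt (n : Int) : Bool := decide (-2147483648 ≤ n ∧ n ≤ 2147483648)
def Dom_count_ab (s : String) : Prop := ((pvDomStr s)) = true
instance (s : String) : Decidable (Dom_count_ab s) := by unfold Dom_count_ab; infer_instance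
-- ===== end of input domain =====

-- B replaces A's previous-character state machine with the built-in substring
-- count s.count('ab') ("idiomatic"): 'ab' cannot overlap itself, so the counts agree.

-- ===== PORT A =====
-- state = (count, previous); one step of A's loop body
def count_ab (s : String) : Int :=
  (s.toList.foldl
    (fun (st : Int × Option Char) (c : Char) =>
      (if c == 'b' && st.2 == some 'a' then st.1 + 1 else st.1, some c))
    (0, none)).1

-- ===== PORT B =====
def count_ab_alt (s : String) : Int :=
  (PySem.Str.count s "ab" : Int)

-- ===== PRECONDITION & SPEC =====
def Spec_count_ab (s : String) (out : Int) : Prop := out = count_ab_alt s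
instance (s : String) (out : Int) : Decidable (Spec_count_ab s out) := by unfold Spec_count_ab; infer_instance

-- ===== CLAIM (what is proved, stated in full; the proofs are below) =====
def Claim_equal_count_ab : Prop := ∀ (s : String), Dom_count_ab s → Spec_count_ab s (count_ab s)

-- ===== LEMMAS AND PROOFS =====

-- number of (possibly "restarting") 'a','b' adjacent pairs, skipping both chars on a match
def pairCount : List Char → Nat
  | x :: y :: t => if x = 'a' ∧ y = 'b' then pairCount t + 1 else pairCount (y :: t)
  | _ => 0

-- A's loop, counted from an arbitrary previous character
def foldCount : Option Char → List Char → Nat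
  | _, [] => 0
  | p, c :: t => (if c = 'b' ∧ p = some 'a' then 1 else 0) + foldCount (some c) t

theorem foldl_eq_foldCount (l : List Char) (c0 : Int) (p : Option Char) :
    (l.foldl
      (fun (st : Int × Option Char) (c : Char) =>
        (if c == 'b' && st.2 == some 'a' then st.1 + 1 else st.1, some c))
      (c0, p)).1 = c0 + (foldCount p l : Int) := by
  induction l generalizing c0 p with
  | nil => simp [foldCount]
  | cons c t ih =>
    simp only [List.foldl_cons, foldCount, ih]
    by_cases h : c = 'b' ∧ p = some 'a'
    · simp [h.1, h.2]; ring
    · have hb : (c == 'b' && p == some 'a') = false := by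
        rcases Decidable.not_and_iff_not_or_not.mp h with h1 | h1 <;> simp [h1]
      simp [hb, h]

theorem foldCount_some (t : List Char) (x : Char) :
    foldCount (some x) t = pairCount (x :: t) := by
  induction t generalizing x with
  | nil => simp [foldCount, pairCount]
  | cons y t' ih =>
    show (if y = 'b' ∧ some x = some 'a' then 1 else 0) + foldCount (some y) t' = _
    rw [ih]
    by_cases h : x = 'a' ∧ y = 'b'
    · obtain ⟨hx, hy⟩ := h; subst hx; subst hy
      rw [if_pos (⟨rfl, rfl⟩ : ('b':Char) = 'b' ∧ some ('a':Char) = some 'a')]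
      rw [show pairCount ('a' :: 'b' :: t') = pairCount t' + 1 from by
        rw [pairCount, if_pos ⟨rfl, rfl⟩]]
      -- pairCount ('b' :: t') = pairCount t' since a 'b' head never starts a match
      cases t' with
      | nil => simp [pairCount]
      | cons z t'' => simp [pairCount]; omega
    · have : ¬ (y = 'b' ∧ some x = some 'a') := by
        intro ⟨h1, h2⟩; exact h ⟨Option.some_injective _ h2, h1⟩
      rw [if_neg this, Nat.zero_add]
      rw [show pairCount (x :: y :: t') = pairCount (y :: t') from by
        rw [pairCount, if_neg h]]

theorem go_eq_pairCount (fuel : Nat) (l : List Char) (acc : Nat)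
    (h : l.length ≤ fuel) :
    PySem.Chars.count.go ['a', 'b'] fuel l acc = acc + pairCount l := by
  induction fuel generalizing l acc with
  | zero =>
    have : l = [] := List.eq_nil_of_length_eq_zero (Nat.le_zero.mp h)
    subst this; simp [PySem.Chars.count.go, pairCount]
  | succ n ih =>
    cases l with
    | nil => simp [PySem.Chars.count.go, pairCount]
    | cons x t =>
      cases t with
      | nil =>
        have hpre : List.isPrefixOf ['a', 'b'] [x] = false := by
          simp [List.isPrefixOf]
        rw [PySem.Chars.count.go, hpre]
        simp only [Bool.false_eq_true, if_false]
        rw [ih [] acc (Nat.zero_le n)]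
        simp [pairCount]
      | cons y t' =>
        by_cases hxy : x = 'a' ∧ y = 'b'
        · obtain ⟨hx, hy⟩ := hxy; subst hx; subst hy
          have hpre : List.isPrefixOf ['a', 'b'] ('a' :: 'b' :: t') = true := by
            simp [List.isPrefixOf]
          rw [PySem.Chars.count.go, hpre]
          simp only [List.length_cons] at h
          have ht : t'.length ≤ n := by omega
          simp only [if_true]
          rw [show List.drop (['a','b'] : List Char).length (('a' : Char) :: 'b' :: t') = t' from rfl]
          rw [ih t' (acc + 1) ht]
          rw [show pairCount ('a' :: 'b' :: t') = pairCount t' + 1 from by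
            rw [pairCount, if_pos ⟨rfl, rfl⟩]]
          omega
        · have hpre : List.isPrefixOf ['a', 'b'] (x :: y :: t') = false := by
            simp only [List.isPrefixOf, Bool.and_true,
              Bool.and_eq_false_iff, beq_eq_false_iff_ne, ne_eq]
            by_cases hx : x = 'a'
            · subst hx; right; intro hy; exact hxy ⟨rfl, hy.symm⟩
            · left; exact fun hh => hx hh.symm
          rw [PySem.Chars.count.go, hpre]
          simp only [Bool.false_eq_true, if_false]
          have ht : (y :: t').length ≤ n := by
            simpa using Nat.le_of_succ_le_succ h
          rw [ih (y :: t') acc ht]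
          rw [show pairCount (x :: y :: t') = pairCount (y :: t') from by
            rw [pairCount, if_neg hxy]]
-- ===== VERDICT (by name: the statement is the Claim_ definition above) =====
theorem count_ab_spec : Claim_equal_count_ab := by
  intro s _
  unfold Spec_count_ab count_ab count_ab_alt
  rw [PySem.Str.count_eq]
  rw [foldl_eq_foldCount]
  simp only [Int.zero_add]
  have hcount : PySem.Chars.count s.toList "ab".toList = pairCount s.toList := by
    rw [PySem.Chars.count]
    simp only [show ("ab".toList) = ['a', 'b'] from rfl, List.isEmpty_cons,
      Bool.false_eq_true, if_false]
    rw [go_eq_pairCount _ _ 0 (Nat.le_refl _)]; omega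
  rw [hcount]
  cases s.toList with
  | nil => simp [foldCount, pairCount]
  | cons x t =>
    rw [show foldCount none (x :: t) = foldCount (some x) t from by
      simp [foldCount]]
    rw [foldCount_some]
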